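-- pv_equiv track=rewrite | github.com/lyf1234098/-https-github.com-prabhatram-Python-examples | exercise_1.py | replace_word
-- ===== SOURCE A (Python) =====
-- def replace_word(text):
--     count = 1
--     words = text.split()
--     for i in range(len(words)):
--         if words[i] == "terrible":
--             count += 1
--             if count % 2 == 0:
--                 words[i] = "pathetic"
--             else:
--                 words[i] = "marvellous"
--     return " ".join(words), count
-- ===== SOURCE B (Python) =====
-- def replace_word(text):
--     # split-on-delimiter: cut the word list into segments separated by "terrible",
--     # then rejoin the segments interleaved with alternating replacement tokens.
--     segments = []
--     seg = []
--     for w in text.split():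
--         if w == "terrible":
--             segments.append(seg)
--             seg = []
--         else:
--             seg.append(w)
--     segments.append(seg)
--     reps = ["pathetic" if j % 2 == 0 else "marvellous" for j in range(len(segments) - 1)]
--     out = segments[0][:]
--     for r, s in zip(reps, segments[1:]):
--         out.append(r)
--         out.extend(s)
--     return " ".join(out), len(segments)
-- ===== Notes on version B (the rewrite author's own statement) =====
-- stated objective: alternative
-- what changed: B works by split-and-rejoin: it cuts the word list into segments delimited by 'terrible', builds the alternating replacement tokens separately, and reconstructs the output by interleaving segments with tokens (count = number of segments); A mutates a word array in place under a running counter.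
import Mathlib
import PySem

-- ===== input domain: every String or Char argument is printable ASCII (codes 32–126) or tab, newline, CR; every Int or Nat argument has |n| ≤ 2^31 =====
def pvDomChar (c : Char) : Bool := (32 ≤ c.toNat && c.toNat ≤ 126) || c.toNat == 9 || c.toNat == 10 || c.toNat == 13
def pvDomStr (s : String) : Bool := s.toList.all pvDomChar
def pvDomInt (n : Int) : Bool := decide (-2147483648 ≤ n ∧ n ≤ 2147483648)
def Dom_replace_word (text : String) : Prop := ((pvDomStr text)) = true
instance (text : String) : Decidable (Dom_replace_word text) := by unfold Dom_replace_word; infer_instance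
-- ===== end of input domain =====

-- B is an alternative split-and-rejoin algorithm (segments delimited by "terrible", interleaved with alternating tokens); same cost, no speed claim.

-- ===== PORT A =====
def replace_word (text : String) : String × Int :=
  let words := PySem.Str.split₀ text
  let st := (PySem.List.pyRange 0 (words.length : Int) 1).foldl
    (fun (st : List String × Int) i =>
      if PySem.List.pyGetD st.1 i "" = "terrible" then
        let c := st.2 + 1
        if PySem.Int.mod c 2 = 0 then (PySem.List.pySetD st.1 i "pathetic", c)
        else (PySem.List.pySetD st.1 i "marvellous", c)
      else st) (words, 1)
  (PySem.Str.join " " st.1, st.2)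

-- ===== PORT B =====
def replace_word_alt (text : String) : String × Int :=
  let st := (PySem.Str.split₀ text).foldl
    (fun (st : List (List String) × List String) w =>
      if w = "terrible" then (st.1 ++ [st.2], []) else (st.1, st.2 ++ [w]))
    ([], [])
  let segments := st.1 ++ [st.2]
  let reps := (PySem.List.pyRange 0 ((segments.length : Int) - 1) 1).map
    (fun j => if PySem.Int.mod j 2 = 0 then "pathetic" else "marvellous")
  let out := (reps.zip (segments.drop 1)).foldl
    (fun acc p => (acc ++ [p.1]) ++ p.2) (segments.headD [])
  (PySem.Str.join " " out, (segments.length : Int))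

-- ===== PRECONDITION & SPEC =====
def Spec_replace_word (text : String) (out : String × Int) : Prop := out = replace_word_alt text
instance (text : String) (out : String × Int) : Decidable (Spec_replace_word text out) := by unfold Spec_replace_word; infer_instance

-- ===== CLAIM =====
def Claim_equal_replace_word : Prop := ∀ (text : String), Dom_replace_word text → Spec_replace_word text (replace_word text)

-- ===== LEMMAS AND PROOFS =====

/-- Words marked with A's running-counter rule (counter starts at c). -/
def markA : List String → Int → List String
  | [], _ => []
  | w :: ws, c =>
    if w = "terrible" then
      (if PySem.Int.mod (c + 1) 2 = 0 then "pathetic" else "marvellous") :: markA ws (c + 1)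
    else w :: markA ws c

/-- Words marked by occurrence parity (j = occurrences already seen). -/
def markB : List String → Int → List String
  | [], _ => []
  | w :: ws, j =>
    if w = "terrible" then
      (if PySem.Int.mod j 2 = 0 then "pathetic" else "marvellous") :: markB ws (j + 1)
    else w :: markB ws j

def nTer : List String → Int
  | [] => 0
  | w :: ws => (if w = "terrible" then 1 else 0) + nTer ws

/-- Segment decomposition: (first segment, remaining segments), runs delimited by "terrible". -/
def segsP : List String → List String × List (List String)
  | [] => ([], [])
  | w :: ws =>
    if w = "terrible" then ([], (segsP ws).1 :: (segsP ws).2)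
    else (w :: (segsP ws).1, (segsP ws).2)

/-- Interleave replacement tokens (parity j) before each remaining segment. -/
def weave : List (List String) → Int → List String
  | [], _ => []
  | seg :: rest, j =>
    (if PySem.Int.mod j 2 = 0 then "pathetic" else "marvellous") :: (seg ++ weave rest (j + 1))

theorem markA_eq_markB (ws : List String) : ∀ c : Int, markA ws c = markB ws (c - 1) := by
  induction ws with
  | nil => intro c; rfl
  | cons w ws ih =>
    intro c
    simp only [markA, markB]
    have h : PySem.Int.mod (c + 1) 2 = PySem.Int.mod (c - 1) 2 := by
      simp only [PySem.Int.mod, Int.fmod_eq_emod]; omega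
    by_cases hw : w = "terrible"
    · have h2 : (2 ∣ c + 1) ↔ (2 ∣ c - 1) := by omega
      simp [hw, h, h2, ih (c + 1), show c + 1 - 1 = c - 1 + 1 by ring]
    · simp [hw, ih c]

theorem getD_append_cons (pre ws : List String) (w d : String) :
    PySem.List.pyGetD (pre ++ w :: ws) (pre.length : Int) d = w := by
  simp [PySem.List.pyGetD_natCast, List.getD_eq_getElem?_getD]

theorem setD_append_cons (pre ws : List String) (w v : String) :
    PySem.List.pySetD (pre ++ w :: ws) (pre.length : Int) v = pre ++ v :: ws := by
  simp [PySem.List.pySetD_natCast]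

theorem foldA (suf : List String) : ∀ (pre : List String) (c : Int),
    (PySem.List.pyRange (pre.length : Int) ((pre.length : Int) + suf.length) 1).foldl
      (fun (st : List String × Int) i =>
        if PySem.List.pyGetD st.1 i "" = "terrible" then
          let c := st.2 + 1
          if PySem.Int.mod c 2 = 0 then (PySem.List.pySetD st.1 i "pathetic", c)
          else (PySem.List.pySetD st.1 i "marvellous", c)
        else st) (pre ++ suf, c)
    = (pre ++ markA suf c, c + nTer suf) := by
  induction suf with
  | nil => intro pre c; simp [PySem.List.pyRange_one_eq_nil, markA, nTer]
  | cons w ws ih =>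
    intro pre c
    have hlt : (pre.length : Int) < (pre.length : Int) + ((w :: ws).length : Int) := by
      push_cast [List.length_cons]; omega
    rw [PySem.List.pyRange_one_cons hlt]
    simp only [List.foldl_cons, getD_append_cons]
    simp only [List.length_cons, Nat.cast_add, Nat.cast_one,
      show ((pre.length : Int) + ((ws.length : Int) + 1)) = (pre.length : Int) + 1 + ws.length by ring]
    by_cases hw : w = "terrible"
    · subst hw
      rw [if_pos rfl]
      by_cases hm : PySem.Int.mod (c + 1) 2 = 0
      · rw [if_pos hm, setD_append_cons]
        have H := ih (pre ++ ["pathetic"]) (c + 1)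
        simp only [List.append_assoc, List.singleton_append, List.length_append,
          List.length_cons, List.length_nil, Nat.cast_add, Nat.cast_one, Nat.cast_zero,
          add_zero, zero_add] at H
        rw [H, markA, nTer]
        rw [if_pos rfl, if_pos hm]
        exact Prod.ext rfl (by simp; omega)
      · rw [if_neg hm, setD_append_cons]
        have H := ih (pre ++ ["marvellous"]) (c + 1)
        simp only [List.append_assoc, List.singleton_append, List.length_append,
          List.length_cons, List.length_nil, Nat.cast_add, Nat.cast_one, Nat.cast_zero,
          add_zero, zero_add] at H
        rw [H, markA, nTer]
        rw [if_pos rfl, if_neg hm]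
        exact Prod.ext rfl (by simp; omega)
    · rw [if_neg hw]
      have H := ih (pre ++ [w]) c
      simp only [List.append_assoc, List.singleton_append, List.length_append,
        List.length_cons, List.length_nil, Nat.cast_add, Nat.cast_one, Nat.cast_zero,
        add_zero, zero_add] at H
      rw [H, markA, nTer]
      rw [if_neg hw]
      exact Prod.ext rfl (by simp [hw])

/-- The segment-building foldl computes segsP (relative to accumulated (done, cur)). -/
theorem fold_segs (ws : List String) : ∀ (done : List (List String)) (cur : List String),
    (ws.foldl
      (fun (st : List (List String) × List String) w =>
        if w = "terrible" then (st.1 ++ [st.2], []) else (st.1, st.2 ++ [w]))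
      (done, cur)).1
    ++ [(ws.foldl
      (fun (st : List (List String) × List String) w =>
        if w = "terrible" then (st.1 ++ [st.2], []) else (st.1, st.2 ++ [w]))
      (done, cur)).2]
    = done ++ (cur ++ (segsP ws).1) :: (segsP ws).2 := by
  induction ws with
  | nil => intro done cur; simp [segsP]
  | cons w ws ih =>
    intro done cur
    simp only [List.foldl_cons, segsP]
    by_cases hw : w = "terrible"
    · rw [if_pos hw]
      simp only [if_pos hw]
      rw [ih (done ++ [cur]) []]
      simp
    · rw [if_neg hw]
      simp only [if_neg hw]
      rw [ih done (cur ++ [w])]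
      simp

theorem markB_eq_weave (ws : List String) : ∀ j : Int,
    markB ws j = (segsP ws).1 ++ weave (segsP ws).2 j := by
  induction ws with
  | nil => intro j; rfl
  | cons w ws ih =>
    intro j
    simp only [markB, segsP]
    by_cases hw : w = "terrible"
    · simp only [if_pos hw]
      rw [ih (j + 1)]
      simp [weave]
    · simp only [if_neg hw]
      rw [ih j]
      simp

theorem len_segsP (ws : List String) : (((segsP ws).2).length : Int) = nTer ws := by
  induction ws with
  | nil => rfl
  | cons w ws ih =>
    simp only [segsP, nTer]
    by_cases hw : w = "terrible" <;> simp [hw, ih] <;> omega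

/-- The interleaving zip-fold computes weave. -/
theorem fold_weave (rest : List (List String)) : ∀ (j : Int) (acc : List String),
    (((PySem.List.pyRange j (j + rest.length) 1).map
        (fun j => if PySem.Int.mod j 2 = 0 then "pathetic" else "marvellous")).zip rest).foldl
      (fun acc p => (acc ++ [p.1]) ++ p.2) acc
    = acc ++ weave rest j := by
  induction rest with
  | nil => intro j acc; simp [PySem.List.pyRange_one_eq_nil, weave]
  | cons seg rest ih =>
    intro j acc
    have hlt : j < j + ((seg :: rest).length : Int) := by
      push_cast [List.length_cons]; omega
    rw [PySem.List.pyRange_one_cons hlt]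
    simp only [List.map_cons, List.zip_cons_cons, List.foldl_cons]
    have H := ih (j + 1) ((acc ++ [if PySem.Int.mod j 2 = 0 then "pathetic" else "marvellous"]) ++ seg)
    simp only [List.length_cons, Nat.cast_add, Nat.cast_one,
      show (j + ((rest.length : Int) + 1)) = j + 1 + rest.length by ring] at *
    rw [H, weave]
    simp

-- ===== VERDICT =====
theorem replace_word_spec : Claim_equal_replace_word := by
  intro text _
  unfold Spec_replace_word replace_word replace_word_alt
  have hA := foldA (PySem.Str.split₀ text) [] 1
  simp only [List.nil_append, List.length_nil, Nat.cast_zero, zero_add] at hA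
  have hS := fold_segs (PySem.Str.split₀ text) [] []
  simp only [List.nil_append] at hS
  have hW := fold_weave ((segsP (PySem.Str.split₀ text)).2) 0 ((segsP (PySem.Str.split₀ text)).1)
  simp only [zero_add] at hW
  simp only [hA, hS, List.headD_cons, List.drop_one, List.tail_cons, List.length_cons,
    Nat.cast_add, Nat.cast_one, add_sub_cancel_right, hW]
  rw [← markB_eq_weave, markA_eq_markB, len_segsP]
  norm_num
  ring
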